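-- pv_equiv track=rewrite | github.com/lusee-night/luseepy | simulation/driver/run_sim_universal.py | _normalize_config_name_argv
-- ===== SOURCE A (Python) =====
-- def _strip_yaml_ext(name):
--     if name.endswith(".yaml"):
--         return name[:-5]
--     if name.endswith(".yml"):
--         return name[:-4]
--     return name
--
-- def _normalize_config_name_argv(argv):
--     out = [argv[0]]
--     i = 1
--     while i < len(argv):
--         a = argv[i]
--         if a.startswith("--config-name="):
--             out.append("--config-name=" + _strip_yaml_ext(a.split("=", 1)[1]))
--         elif a in {"--config-name", "-cn"} and i + 1 < len(argv):
--             out.extend([a, _strip_yaml_ext(argv[i + 1])])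
--             i += 1
--         else:
--             out.append(a)
--         i += 1
--     return out
-- ===== SOURCE B (Python) =====
-- def _strip_yaml_ext(name):
--     if name.endswith(".yaml"):
--         return name[:-5]
--     if name.endswith(".yml"):
--         return name[:-4]
--     return name
--
-- def _normalize_config_name_argv(argv):
--     out = [argv[0]]
--     pending = False
--     for a in argv[1:]:
--         if pending:
--             out.append(_strip_yaml_ext(a))
--             pending = False
--         elif a.startswith("--config-name="):
--             out.append("--config-name=" + _strip_yaml_ext(a.split("=", 1)[1]))
--         elif a in ("--config-name", "-cn"):
--             out.append(a)
--             pending = True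
--         else:
--             out.append(a)
--     return out
-- ===== Notes on version B (the rewrite author's own statement) =====
-- stated objective: simpler
-- what changed: Replaced the index-based while loop with i+=1/i+=2 lookahead by a single forward for-loop over argv[1:] that carries a boolean pending flag for a just-seen --config-name/-cn token.
import Mathlib
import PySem

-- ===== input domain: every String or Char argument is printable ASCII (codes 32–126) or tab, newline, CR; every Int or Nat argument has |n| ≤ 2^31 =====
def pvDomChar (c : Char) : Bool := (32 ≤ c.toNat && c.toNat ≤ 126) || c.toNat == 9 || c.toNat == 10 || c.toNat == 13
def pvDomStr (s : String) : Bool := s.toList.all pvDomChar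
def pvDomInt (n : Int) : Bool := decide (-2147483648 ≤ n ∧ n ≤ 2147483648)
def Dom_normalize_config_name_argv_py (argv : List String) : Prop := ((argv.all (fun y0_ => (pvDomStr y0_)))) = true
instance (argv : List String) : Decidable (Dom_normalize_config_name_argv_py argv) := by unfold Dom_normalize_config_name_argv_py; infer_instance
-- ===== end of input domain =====

-- B replaces A's index-based while loop with lookahead by a single forward pass
-- keeping a 'pending' flag; objective: simpler (no index arithmetic), same output.

-- ===== PORT A =====
-- Port of A: the index-lookahead while loop, rendered as the obvious structural
-- recursion on the remaining argv (consuming one or two tokens per step; the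
-- one-token case is the loop body with the lookahead condition i+1 < len false).
def pvStripYamlExt (name : String) : String :=
  if PySem.Str.endswith name ".yaml" then PySem.Str.slice name none (some (-5))
  else if PySem.Str.endswith name ".yml" then PySem.Str.slice name none (some (-4))
  else name

-- a.split("=", 1)[1]; reachable only when a starts with "--config-name=", where
-- "=" occurs in a, so both getD defaults are dead (exact for every reachable call)
def pvSplitEq1 (a : String) : String :=
  ((PySem.Str.splitMax? a "=" 1).getD []).getD 1 ""

def pvGoA : List String → List String
  | [] => []
  | [a] =>
    if PySem.Str.startswith a "--config-name=" then
      ["--config-name=" ++ pvStripYamlExt (pvSplitEq1 a)]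
    else [a]
  | a :: b :: rest' =>
    if PySem.Str.startswith a "--config-name=" then
      ("--config-name=" ++ pvStripYamlExt (pvSplitEq1 a)) :: pvGoA (b :: rest')
    else if a = "--config-name" ∨ a = "-cn" then
      a :: pvStripYamlExt b :: pvGoA rest'
    else a :: pvGoA (b :: rest')

def normalize_config_name_argv_py (argv : List String) : List String :=
  match argv with
  | [] => []          -- unreachable: Pre_ requires argv ≠ [] (Python raises IndexError)
  | a0 :: rest => a0 :: pvGoA rest

-- ===== PORT B =====
def pvStepB (acc : List String × Bool) (a : String) : List String × Bool :=
  if acc.2 then (acc.1 ++ [pvStripYamlExt a], false)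
  else if PySem.Str.startswith a "--config-name=" then
    (acc.1 ++ ["--config-name=" ++ pvStripYamlExt (pvSplitEq1 a)], false)
  else if a = "--config-name" ∨ a = "-cn" then (acc.1 ++ [a], true)
  else (acc.1 ++ [a], false)

def normalize_config_name_argv_py_alt (argv : List String) : List String :=
  match argv with
  | [] => []
  | a0 :: rest => (rest.foldl pvStepB ([a0], false)).1

-- ===== PRECONDITION & SPEC =====
-- Pre_ excludes only the empty list, on which Python A raises IndexError.
def Pre_normalize_config_name_argv_py (argv : List String) : Prop := argv ≠ []
instance (argv : List String) : Decidable (Pre_normalize_config_name_argv_py argv) := by unfold Pre_normalize_config_name_argv_py; infer_instance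
def pvWitness_normalize_config_name_argv_py : List String := ["prog", "-cn", "cfg.yaml"]
def Spec_normalize_config_name_argv_py (argv : List String) (out : List String) : Prop := out = normalize_config_name_argv_py_alt argv
instance (argv : List String) (out : List String) : Decidable (Spec_normalize_config_name_argv_py argv out) := by unfold Spec_normalize_config_name_argv_py; infer_instance

-- ===== CLAIM (what is proved, stated in full; the proofs are below) =====
def Claim_equal_normalize_config_name_argv_py : Prop := ∀ (argv : List String), Dom_normalize_config_name_argv_py argv → Pre_normalize_config_name_argv_py argv → Spec_normalize_config_name_argv_py argv (normalize_config_name_argv_py argv)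

-- ===== LEMMAS AND PROOFS =====
-- Loop invariant: running B's fold from (acc, pending = false) appends exactly
-- what A's lookahead recursion produces.
lemma foldl_pvStepB_false (rest : List String) (acc : List String) :
    (rest.foldl pvStepB (acc, false)).1 = acc ++ pvGoA rest := by
  induction rest using pvGoA.induct generalizing acc with
  | case1 => simp [pvGoA]
  | case2 a hstart =>
    have hs := hstart; simp at hs
    simp [pvGoA, pvStepB, hs]
  | case3 a hstart =>
    have hs := hstart; simp at hs
    by_cases hf : a = "--config-name" ∨ a = "-cn" <;>
      simp [pvGoA, pvStepB, hs, hf]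
  | case4 a b rest' hstart ih =>
    have hs := hstart; simp at hs
    rw [pvGoA, if_pos hstart]
    simp only [List.foldl_cons]
    rw [show pvStepB (acc, false) a
          = (acc ++ ["--config-name=" ++ pvStripYamlExt (pvSplitEq1 a)], false) from by
        simp [pvStepB, hs]]
    rw [← List.foldl_cons, ih]; simp
  | case5 a b rest' hstart hf ih =>
    have hs := hstart; simp at hs
    rw [pvGoA, if_neg hstart, if_pos hf]
    simp only [List.foldl_cons]
    rw [show pvStepB (acc, false) a = (acc ++ [a], true) from by simp [pvStepB, hs, hf]]
    rw [show pvStepB (acc ++ [a], true) b = (acc ++ [a] ++ [pvStripYamlExt b], false) from by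
        simp [pvStepB]]
    rw [ih]; simp
  | case6 a b rest' hstart hf ih =>
    have hs := hstart; simp at hs
    rw [pvGoA, if_neg hstart, if_neg hf]
    simp only [List.foldl_cons]
    rw [show pvStepB (acc, false) a = (acc ++ [a], false) from by simp [pvStepB, hs, hf]]
    rw [← List.foldl_cons, ih]; simp

-- ===== VERDICT (by name: the statement is the Claim_ definition above) =====
theorem normalize_config_name_argv_py_spec : Claim_equal_normalize_config_name_argv_py := by
  intro argv _ hpre
  unfold Spec_normalize_config_name_argv_py
  match argv with
  | [] => exact absurd rfl hpre
  | a0 :: rest =>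
    simp only [normalize_config_name_argv_py, normalize_config_name_argv_py_alt]
    rw [foldl_pvStepB_false]
    simp
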